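-- pv_equiv track=rewrite | github.com/Ayushmaan2001/sorting-visualizer-main | src/Codes/Python/radixsort.py | get_max_num_digits
-- ===== SOURCE A (Python) =====
-- def get_max_num_digits(arr):
--     max_digits = 0
--     for i in arr:
--         digits = 0
--         num = i
--         while num > 0:
--             digits += 1
--             num //= 10
--         max_digits = max(max_digits, digits)
--     return max_digits
-- ===== SOURCE B (Python) =====
-- def get_max_num_digits(arr):
--     if not arr:
--         return 0
--     m = max(arr)
--     digits = 0
--     while m > 0:
--         digits += 1
--         m //= 10
--     return digits
-- ===== Notes on version B (the rewrite author's own statement) =====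
-- stated objective: faster
-- what changed: Instead of running the digit-count loop on every element, B takes max(arr) once and counts the digits of that single maximum (digit count is monotone, and nonpositive elements count as 0 either way).
import Mathlib
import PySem

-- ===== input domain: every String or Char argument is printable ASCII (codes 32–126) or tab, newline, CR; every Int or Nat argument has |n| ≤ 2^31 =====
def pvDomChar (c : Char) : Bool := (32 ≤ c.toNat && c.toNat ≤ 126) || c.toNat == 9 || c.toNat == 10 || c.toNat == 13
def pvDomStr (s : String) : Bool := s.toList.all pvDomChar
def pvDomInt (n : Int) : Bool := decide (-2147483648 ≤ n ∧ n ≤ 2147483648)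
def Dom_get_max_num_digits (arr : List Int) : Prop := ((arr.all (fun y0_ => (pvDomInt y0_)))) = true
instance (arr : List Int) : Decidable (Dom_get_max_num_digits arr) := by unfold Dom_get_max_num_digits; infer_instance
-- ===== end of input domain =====

-- B computes max(arr) once and counts the digits of that single maximum (O(n+d) instead of A's per-element digit loop).


-- ===== PORT A =====
-- inner 'while num > 0: digits += 1; num //= 10' loop of A
def pvDigitLoop (digits : Int) (num : Int) : Int :=
  if num > 0 then pvDigitLoop (digits + 1) (PySem.Int.floordiv num 10) else digits
termination_by num.toNat
decreasing_by
  have h10 : PySem.Int.floordiv num 10 = num / 10 :=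
    PySem.Int.floordiv_eq_ediv_of_pos (by omega)
  rw [h10]; omega

def get_max_num_digits (arr : List Int) : Int :=
  arr.foldl (fun max_digits i => max max_digits (pvDigitLoop 0 i)) 0

-- ===== PORT B =====
def get_max_num_digits_alt (arr : List Int) : Int :=
  match PySem.List.max? arr (fun y => y) with
  | none => 0
  | some m => pvDigitLoop 0 m

-- ===== PRECONDITION & SPEC =====
def Spec_get_max_num_digits (arr : List Int) (out : Int) : Prop := out = get_max_num_digits_alt arr
instance (arr : List Int) (out : Int) : Decidable (Spec_get_max_num_digits arr out) := by unfold Spec_get_max_num_digits; infer_instance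

-- ===== CLAIM (what is proved, stated in full; the proofs are below) =====
def Claim_equal_get_max_num_digits : Prop := ∀ (arr : List Int), Dom_get_max_num_digits arr → Spec_get_max_num_digits arr (get_max_num_digits arr)

-- ===== LEMMAS AND PROOFS =====

theorem pvDigitLoop_nonneg (d n : Int) (hd : 0 ≤ d) : 0 ≤ pvDigitLoop d n := by
  unfold pvDigitLoop
  split
  · exact pvDigitLoop_nonneg (d + 1) _ (by omega)
  · exact hd
termination_by n.toNat
decreasing_by
  have h10 : PySem.Int.floordiv n 10 = n / 10 :=
    PySem.Int.floordiv_eq_ediv_of_pos (by omega)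
  rw [h10]; omega

theorem pvDigitLoop_nonpos (d n : Int) (hn : n ≤ 0) : pvDigitLoop d n = d := by
  unfold pvDigitLoop
  split
  · omega
  · rfl

theorem pvDigitLoop_shift (d n : Int) : pvDigitLoop d n = d + pvDigitLoop 0 n := by
  by_cases hn : n > 0
  · conv_lhs => rw [pvDigitLoop]
    conv_rhs => rw [pvDigitLoop]
    rw [if_pos hn, if_pos hn,
        pvDigitLoop_shift (d + 1) (PySem.Int.floordiv n 10),
        pvDigitLoop_shift (0 + 1) (PySem.Int.floordiv n 10)]
    ring
  · rw [pvDigitLoop_nonpos d n (by omega), pvDigitLoop_nonpos 0 n (by omega)]; ring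
termination_by n.toNat
decreasing_by
  all_goals
    have h10 : PySem.Int.floordiv n 10 = n / 10 :=
      PySem.Int.floordiv_eq_ediv_of_pos (by omega)
    rw [h10]; omega

theorem pvDigitLoop_mono (a b : Int) (h : a ≤ b) :
    pvDigitLoop 0 a ≤ pvDigitLoop 0 b := by
  by_cases hb : b > 0
  · by_cases ha : a > 0
    · have ha10 : PySem.Int.floordiv a 10 = a / 10 :=
        PySem.Int.floordiv_eq_ediv_of_pos (by omega)
      have hb10 : PySem.Int.floordiv b 10 = b / 10 :=
        PySem.Int.floordiv_eq_ediv_of_pos (by omega)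
      conv_lhs => rw [pvDigitLoop]
      conv_rhs => rw [pvDigitLoop]
      rw [if_pos ha, if_pos hb, ha10, hb10,
          pvDigitLoop_shift (0 + 1) (a / 10), pvDigitLoop_shift (0 + 1) (b / 10)]
      have := pvDigitLoop_mono (a / 10) (b / 10) (Int.ediv_le_ediv (by omega) h)
      omega
    · rw [pvDigitLoop_nonpos 0 a (by omega)]
      exact pvDigitLoop_nonneg 0 b le_rfl
  · rw [pvDigitLoop_nonpos 0 a (by omega), pvDigitLoop_nonpos 0 b (by omega)]
termination_by b.toNat
decreasing_by omega

theorem main_fold (cd : Int → Int)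
    (hmono : ∀ a b, a ≤ b → cd a ≤ cd b) :
    ∀ (l : List Int) (a : Int),
      l.foldl (fun md i => max md (cd i)) (cd a) = cd (l.foldl max a) := by
  intro l
  induction l with
  | nil => intro a; rfl
  | cons b t ih =>
      intro a
      have : max (cd a) (cd b) = cd (max a b) := by
        rcases le_total a b with h | h
        · rw [max_eq_right (hmono a b h), max_eq_right h]
        · rw [max_eq_left (hmono b a h), max_eq_left h]
      simp only [List.foldl_cons, this, ih]

-- ===== VERDICT (by name: the statement is the Claim_ definition above) =====
theorem get_max_num_digits_spec : Claim_equal_get_max_num_digits := by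
  intro arr _
  unfold Spec_get_max_num_digits get_max_num_digits get_max_num_digits_alt
  cases arr with
  | nil => rfl
  | cons a t =>
      rw [PySem.List.max?_id_cons]
      simp only [List.foldl_cons]
      have h0 : max 0 (pvDigitLoop 0 a) = pvDigitLoop 0 a :=
        max_eq_right (pvDigitLoop_nonneg 0 a le_rfl)
      rw [h0]
      exact main_fold (pvDigitLoop 0) pvDigitLoop_mono t a
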